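-- pv_equiv track=rewrite | github.com/BaeInpyo/ProgrammingExercise | Chapter11_CombinationalSearch/Kakuro2/ygg_kakuro2.py | getMaxCandi
-- ===== SOURCE A (Python) =====
-- def getMaxCandi(val, numOfWhite):
--     if numOfWhite == 1:
--         return val
--     maxLimit = 10-numOfWhite
--     maxBase = sum(range(11-numOfWhite,10))
--     for i in range(1, maxLimit+1):
--         if maxBase + i >= val:
--             return i
-- ===== SOURCE B (Python) =====
-- def getMaxCandi(val, numOfWhite):
--     if numOfWhite == 1:
--         return val
--     maxLimit = 10 - numOfWhite
--     maxBase = (20 - numOfWhite) * (numOfWhite - 1) // 2 if numOfWhite >= 2 else 0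
--     candi = max(1, val - maxBase)
--     if candi <= maxLimit:
--         return candi
-- ===== Notes on version B (the rewrite author's own statement) =====
-- stated objective: faster
-- what changed: Replaces the range-sum and the digit-by-digit scan with closed-form arithmetic: maxBase = (20-n)*(n-1)//2 and candi = max(1, val - maxBase), returned iff candi <= maxLimit.
-- outside the precondition, e.g. on getMaxCandi(100, 5): A returns None, B returns None
import Mathlib
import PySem

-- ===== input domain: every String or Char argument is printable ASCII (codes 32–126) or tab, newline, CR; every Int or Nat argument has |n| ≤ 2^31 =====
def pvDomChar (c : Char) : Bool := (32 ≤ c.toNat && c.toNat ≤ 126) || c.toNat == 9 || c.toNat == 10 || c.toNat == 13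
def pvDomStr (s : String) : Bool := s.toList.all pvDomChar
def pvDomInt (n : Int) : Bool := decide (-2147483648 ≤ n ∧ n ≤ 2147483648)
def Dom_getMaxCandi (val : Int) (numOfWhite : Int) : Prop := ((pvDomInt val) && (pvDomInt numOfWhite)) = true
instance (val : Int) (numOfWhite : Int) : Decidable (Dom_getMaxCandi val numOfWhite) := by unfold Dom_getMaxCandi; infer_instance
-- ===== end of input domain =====

-- B replaces A's range-sum and digit-by-digit scan with closed-form arithmetic: O(1) instead of a linear scan (timing run measured B faster).


-- ===== PORT A =====
-- 'for i in range(1, maxLimit+1): if maxBase + i >= val: return i' — ported as a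
-- structural recursion over the loop counter i (terminates because maxLimit+1-i shrinks);
-- the fall-through (Python returns None, no Int) yields 0 and is excluded by Pre_.
def getMaxCandiLoop (val maxBase maxLimit i : Int) : Int :=
  if i ≤ maxLimit then
    if maxBase + i ≥ val then i
    else getMaxCandiLoop val maxBase maxLimit (i + 1)
  else 0
termination_by (maxLimit + 1 - i).toNat
decreasing_by omega

def getMaxCandi (val : Int) (numOfWhite : Int) : Int :=
  if numOfWhite == 1 then val
  else
    let maxLimit := 10 - numOfWhite
    let maxBase := (PySem.List.pyRange (11 - numOfWhite) 10 1).sum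
    getMaxCandiLoop val maxBase maxLimit 1

-- ===== PORT B =====
def getMaxCandi_alt (val : Int) (numOfWhite : Int) : Int :=
  if numOfWhite == 1 then val
  else
    let maxLimit := 10 - numOfWhite
    let maxBase := if numOfWhite ≥ 2 then (20 - numOfWhite) * (numOfWhite - 1) / 2 else 0
    let candi := max 1 (val - maxBase)
    if candi ≤ maxLimit then candi else 0

-- ===== PRECONDITION & SPEC =====
-- Pre_ excludes exactly the inputs where A's loop falls through and Python returns None
-- (no Int value): numOfWhite ≠ 1 and either maxLimit < 1 or val - maxBase > maxLimit.
def Pre_getMaxCandi (val : Int) (numOfWhite : Int) : Prop :=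
  numOfWhite = 1 ∨
    (numOfWhite ≤ 9 ∧
      val - (if numOfWhite ≥ 2 then (20 - numOfWhite) * (numOfWhite - 1) / 2 else 0) ≤ 10 - numOfWhite)
instance (val : Int) (numOfWhite : Int) : Decidable (Pre_getMaxCandi val numOfWhite) := by
  unfold Pre_getMaxCandi; infer_instance

def pvWitness_getMaxCandi : Int × Int := (20, 4)

def Spec_getMaxCandi (val : Int) (numOfWhite : Int) (out : Int) : Prop := out = getMaxCandi_alt val numOfWhite
instance (val : Int) (numOfWhite : Int) (out : Int) : Decidable (Spec_getMaxCandi val numOfWhite out) := by unfold Spec_getMaxCandi; infer_instance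

-- ===== CLAIM (what is proved, stated in full; the proofs are below) =====
def Claim_equal_getMaxCandi : Prop := ∀ (val : Int) (numOfWhite : Int), Dom_getMaxCandi val numOfWhite → Pre_getMaxCandi val numOfWhite → Spec_getMaxCandi val numOfWhite (getMaxCandi val numOfWhite)

-- ===== LEMMAS AND PROOFS =====

-- the empty range: sum(range(a,10)) = 0 for a ≥ 10 (numOfWhite ≤ 1)
lemma sum_pyRange_empty (a : Int) (h : (10:Int) ≤ a) :
    (PySem.List.pyRange a 10 1).sum = 0 := by
  rw [PySem.List.pyRange_one_eq_nil h]; rfl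

-- sum(range(11-n,10)) = (20-n)*(n-1)/2 for 2 ≤ n ≤ 9 (finite case check)
lemma sum_pyRange_formula (n : Int) (h2 : 2 ≤ n) (h9 : n ≤ 9) :
    (PySem.List.pyRange (11 - n) 10 1).sum = (20 - n) * (n - 1) / 2 := by
  interval_cases n <;> decide

-- the scan returns candi = max 1 (val - maxBase) whenever it starts at i ≤ candi ≤ maxLimit
lemma loop_eq_candi (val maxBase maxLimit : Int) (i : Int)
    (h1 : 1 ≤ i) (hle : i ≤ max 1 (val - maxBase)) (hmax : max 1 (val - maxBase) ≤ maxLimit) :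
    getMaxCandiLoop val maxBase maxLimit i = max 1 (val - maxBase) := by
  set candi := max 1 (val - maxBase) with hc
  generalize hk : (candi - i).toNat = k
  induction k generalizing i with
  | zero =>
    have hi : i = candi := by omega
    subst hi
    rw [getMaxCandiLoop]
    have h2' : val ≤ maxBase + candi := by
      have := le_max_right 1 (val - maxBase)
      omega
    simp [hmax, h2']
  | succ k ih =>
    have hi : i < candi := by omega
    rw [getMaxCandiLoop]
    have h1' : i ≤ maxLimit := by omega
    have h2' : ¬ maxBase + i ≥ val := by
      have : candi = val - maxBase := by omega
      omega
    simp only [h1', if_true, h2', if_false]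
    exact ih (i + 1) (by omega) (by omega) (by omega)

-- ===== VERDICT (by name: the statement is the Claim_ definition above) =====
theorem getMaxCandi_spec : Claim_equal_getMaxCandi := by
  intro val n _ hpre
  unfold Spec_getMaxCandi getMaxCandi getMaxCandi_alt
  by_cases h1 : n = 1
  · simp [h1]
  · simp only [h1, beq_iff_eq]
    rcases hpre with rfl | ⟨hn9, hval⟩
    · exact absurd rfl h1
    have hbase : (PySem.List.pyRange (11 - n) 10 1).sum =
        (if n ≥ 2 then (20 - n) * (n - 1) / 2 else 0) := by
      by_cases h2 : (2:Int) ≤ n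
      · rw [if_pos h2]; exact sum_pyRange_formula n h2 hn9
      · rw [if_neg h2]; exact sum_pyRange_empty _ (by omega)
    rw [hbase]
    set B := (if n ≥ 2 then (20 - n) * (n - 1) / 2 else 0) with hB
    have hcand : max 1 (val - B) ≤ 10 - n := by
      have hml : (1:Int) ≤ 10 - n := by omega
      omega
    rw [loop_eq_candi val B (10 - n) 1 le_rfl (le_max_left _ _) hcand]
    simp [hcand]
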